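-- pv_equiv track=rewrite | github.com/kamilware/aoc | 2015/d5.py | _contains_pair_no_overlapping
-- ===== SOURCE A (Python) =====
-- def _contains_pair_no_overlapping(input: str) -> bool:
--     for i in range(len(input)):
--         try:
--             pair = input[i], input[i + 1]
--             if f"{pair[0]}{pair[1]}" in "".join(input[i + 2 :]):
--                 return True
--         except IndexError:
--             return False
--
--     return False
-- ===== SOURCE B (Python) =====
-- def _contains_pair_no_overlapping(input: str) -> bool:
--     first = {}
--     for i, p in enumerate(zip(input, input[1:])):
--         if i - first.setdefault(p, i) >= 2:
--             return True
--     return False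
-- ===== Notes on version B (the rewrite author's own statement) =====
-- stated objective: faster
-- what changed: A searches each adjacent pair as a substring of the remaining suffix (quadratic rescanning); B makes a single pass recording the first index of every adjacent pair in a dict and returns True when the current index is at least 2 past that first index.
import Mathlib
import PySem

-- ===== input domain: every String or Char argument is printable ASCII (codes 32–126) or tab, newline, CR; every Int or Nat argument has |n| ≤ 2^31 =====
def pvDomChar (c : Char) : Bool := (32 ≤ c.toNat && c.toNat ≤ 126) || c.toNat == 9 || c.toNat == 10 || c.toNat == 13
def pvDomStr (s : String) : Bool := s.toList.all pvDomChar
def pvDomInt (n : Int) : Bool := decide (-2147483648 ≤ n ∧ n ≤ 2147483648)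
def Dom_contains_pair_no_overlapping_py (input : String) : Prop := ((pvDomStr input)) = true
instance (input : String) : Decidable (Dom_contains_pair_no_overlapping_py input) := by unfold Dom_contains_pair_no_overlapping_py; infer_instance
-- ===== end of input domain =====

-- B replaces A's quadratic scan (each pair searched in the remaining suffix) by a single
-- pass recording the first index of every adjacent pair in a dict and testing gap ≥ 2: faster.

-- ===== PORT A =====
-- loop 'for i in range(len(input))' with early returns; input[i+1] raising IndexError → returns False
def pvContainsA (cs : List Char) : List Nat → Bool
  | [] => false
  | i :: rest =>
    match PySem.List.pyGet? cs (i : Int), PySem.List.pyGet? cs ((i : Int) + 1) with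
    | some c0, some c1 =>
      -- f"{pair[0]}{pair[1]}" in "".join(input[i+2:])
      if PySem.Chars.isIn [c0, c1]
          (PySem.Chars.join [] ((PySem.List.slice cs (some ((i : Int) + 2)) none).map (fun c => [c]))) then
        true
      else pvContainsA cs rest
    | _, _ => false

def contains_pair_no_overlapping_py (input : String) : Bool :=
  pvContainsA input.toList (List.range input.toList.length)

-- ===== PORT B =====
-- 'for i, p in enumerate(zip(input, input[1:])): f = first.setdefault(p, i); if i - f >= 2: return True'
def pvContainsB : List (Int × (Char × Char)) → PySem.Dict (Char × Char) Int → Bool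
  | [], _ => false
  | (i, p) :: rest, d =>
    -- 'if i - first.setdefault(p, i) >= 2: return True'
    if 2 ≤ i - (d.get? p).getD i then true
    else pvContainsB rest (d.setdefault p i)

def contains_pair_no_overlapping_py_alt (input : String) : Bool :=
  pvContainsB
    (PySem.List.enumerate (input.toList.zip (PySem.List.slice input.toList (some 1) none)) 0)
    PySem.Dict.empty

-- ===== PRECONDITION & SPEC =====
def Spec_contains_pair_no_overlapping_py (input : String) (out : Bool) : Prop := out = contains_pair_no_overlapping_py_alt input
instance (input : String) (out : Bool) : Decidable (Spec_contains_pair_no_overlapping_py input out) := by unfold Spec_contains_pair_no_overlapping_py; infer_instance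

-- ===== CLAIM (what is proved, stated in full; the proofs are below) =====
def Claim_equal_contains_pair_no_overlapping_py : Prop := ∀ (input : String), Dom_contains_pair_no_overlapping_py input → Spec_contains_pair_no_overlapping_py input (contains_pair_no_overlapping_py input)

-- ===== LEMMAS AND PROOFS =====

-- the list of adjacent pairs of cs
def pvPairs (cs : List Char) : List (Char × Char) := cs.zip cs.tail

lemma pvPairs_length (cs : List Char) : (pvPairs cs).length = cs.length - 1 := by
  simp [pvPairs, List.length_zip]

lemma pvPairs_getElem (cs : List Char) (i : Nat) (h : i < (pvPairs cs).length) :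
    (pvPairs cs)[i] = (cs[i]'(by have := pvPairs_length cs; omega),
                       cs[i+1]'(by have := pvPairs_length cs; omega)) := by
  simp [pvPairs, List.getElem_zip, List.getElem_tail]

lemma pvPairs_drop (cs : List Char) (k : Nat) :
    pvPairs (cs.drop k) = (pvPairs cs).drop k := by
  induction k generalizing cs with
  | zero => simp
  | succ k ih =>
    cases cs with
    | nil => simp [pvPairs]
    | cons x t =>
      rw [List.drop_succ_cons]
      rw [ih]
      cases t with
      | nil => simp [pvPairs]
      | cons y u => simp [pvPairs, List.zip]

-- [a,b] is an infix of l iff (a,b) is an adjacent pair of l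
lemma pvPair_infix_iff (a b : Char) (l : List Char) :
    [a, b] <:+: l ↔ (a, b) ∈ pvPairs l := by
  induction l with
  | nil => simp [pvPairs]
  | cons x t ih =>
    rw [List.infix_cons_iff]
    cases t with
    | nil =>
      simp [pvPairs]
    | cons y u =>
      have hp : pvPairs (x :: y :: u) = (x, y) :: pvPairs (y :: u) := by
        simp [pvPairs, List.zip]
      rw [hp, List.mem_cons, ← ih]
      constructor
      · rintro (hpre | hinf)
        · left
          rw [List.cons_prefix_cons] at hpre
          obtain ⟨rfl, hpre⟩ := hpre
          rw [List.cons_prefix_cons] at hpre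
          obtain ⟨rfl, -⟩ := hpre
          rfl
        · right; exact hinf
      · rintro (heq | hinf)
        · left
          obtain ⟨rfl, rfl⟩ := Prod.mk.injEq .. ▸ heq
          simp [List.cons_prefix_cons]
        · right; exact hinf

-- first-occurrence index facts
lemma pvIdxOf_getElem_le {α : Type} [BEq α] [LawfulBEq α] (l : List α) (i : Nat) (h : i < l.length) :
    l.idxOf l[i] ≤ i := by
  induction l generalizing i with
  | nil => simp at h
  | cons x t ih =>
    cases i with
    | zero => simp
    | succ i =>
      have hi' : i < t.length := by simpa using h
      simp only [List.getElem_cons_succ]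
      rw [List.idxOf_cons]
      simp only [Bool.cond_eq_ite, beq_iff_eq]
      by_cases hx : x = t[i]'hi'
      · rw [if_pos (beq_iff_eq.mpr hx)]; omega
      · rw [if_neg (fun h => hx (eq_of_beq h))]
        have := ih i hi'
        omega

lemma pvMem_take_iff_idxOf {α : Type} [BEq α] [LawfulBEq α] (l : List α) (p : α) (k : Nat)
    (hp : p ∈ l) : p ∈ l.take k ↔ l.idxOf p < k := by
  induction l generalizing k with
  | nil => simp at hp
  | cons x t ih =>
    cases k with
    | zero => simp
    | succ k =>
      simp only [List.take_succ_cons, List.mem_cons]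
      rw [List.idxOf_cons]
      by_cases hx : p = x
      · simp [hx]
      · have ht : p ∈ t := (List.mem_cons.mp hp).resolve_left hx
        simp only [hx, false_or, Bool.cond_eq_ite]
        rw [if_neg (fun h => hx (eq_of_beq h).symm)]
        rw [ih k ht]
        omega

-- A's loop over range' computes the infix search from every start
lemma pvA_range' (cs : List Char) :
    ∀ b a, a + b = cs.length →
      (pvContainsA cs (List.range' a b) = true ↔
        ∃ i, a ≤ i ∧ ∃ _ : i + 1 < cs.length,
          [cs[i], cs[i+1]] <:+: cs.drop (i + 2)) := by
  intro b
  induction b with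
  | zero =>
    intro a ha
    simp only [List.range'_zero, pvContainsA, Bool.false_eq_true, false_iff]
    rintro ⟨i, hi, h1, -⟩
    omega
  | succ b ih =>
    intro a ha
    rw [List.range'_succ]
    have ha' : a < cs.length := by omega
    have hg1 : PySem.List.pyGet? cs (a : Int) = some (cs[a]'ha') := by
      rw [PySem.List.pyGet?_natCast]; exact List.getElem?_eq_getElem ha'
    have hcast : (a : Int) + 1 = ((a + 1 : Nat) : Int) := by push_cast; ring
    by_cases hb : a + 1 < cs.length
    · have hg2 : PySem.List.pyGet? cs ((a : Int) + 1) = some (cs[a+1]'hb) := by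
        rw [hcast, PySem.List.pyGet?_natCast]; exact List.getElem?_eq_getElem hb
      simp only [pvContainsA, hg1, hg2]
      rw [show PySem.List.slice cs (some ((a : Int) + 2)) none = cs.drop (a + 2) by
            rw [show ((a : Int) + 2) = ((a + 2 : Nat) : Int) by push_cast; ring,
              PySem.List.slice_from_natCast],
          PySem.Chars.join_nil_singletons]
      cases hc : PySem.Chars.isIn [cs[a], cs[a+1]] (cs.drop (a + 2)) with
      | true =>
        rw [if_pos rfl]
        exact iff_of_true rfl ⟨a, le_refl a, hb, (PySem.Chars.isIn_iff_infix _ _).mp hc⟩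
      | false =>
        rw [if_neg (by simp)]
        rw [ih (a + 1) (by omega)]
        constructor
        · rintro ⟨i, hi, h1, h2⟩; exact ⟨i, by omega, h1, h2⟩
        · rintro ⟨i, hi, h1, h2⟩
          rcases Nat.eq_or_lt_of_le hi with rfl | hlt
          · exact absurd h2 ((PySem.Chars.isIn_eq_false_iff _ _).mp hc)
          · exact ⟨i, hlt, h1, h2⟩
    · have hg2 : PySem.List.pyGet? cs ((a : Int) + 1) = none := by
        rw [hcast, PySem.List.pyGet?_natCast]
        exact List.getElem?_eq_none (by omega)
      simp only [pvContainsA, hg1, hg2, Bool.false_eq_true, false_iff]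
      rintro ⟨i, hi, h1, -⟩
      omega

-- B's loop invariant: d maps each pair seen so far to its first index
lemma pvB_loop (ps : List (Char × Char)) :
    ∀ m k (d : PySem.Dict (Char × Char) Int), m = ps.length - k →
      (∀ p, d.get? p = if p ∈ ps.take k then some ((ps.idxOf p : Int)) else none) →
      (pvContainsB (PySem.List.enumerate (ps.drop k) (k : Int)) d = true ↔
        ∃ j, k ≤ j ∧ ∃ _ : j < ps.length, ps.idxOf ps[j] + 2 ≤ j) := by
  intro m
  induction m with
  | zero =>
    intro k d hm hd
    rw [List.drop_eq_nil_of_le (by omega : ps.length ≤ k)]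
    simp only [PySem.List.enumerate_nil, pvContainsB, Bool.false_eq_true, false_iff]
    rintro ⟨j, hj, h1, -⟩
    omega
  | succ m ih =>
    intro k d hm hd
    have hk : k < ps.length := by omega
    have hmemk : ps[k] ∈ ps := List.getElem_mem hk
    rw [List.drop_eq_getElem_cons hk, PySem.List.enumerate_cons,
        show (k : Int) + 1 = ((k + 1 : Nat) : Int) by push_cast; ring]
    simp only [pvContainsB]
    rw [hd ps[k]]
    have htake1 : ps.take (k + 1) = ps.take k ++ [ps[k]] := by
      rw [List.take_add_one, List.getElem?_eq_getElem hk]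
      rfl
    by_cases hmem : ps[k] ∈ ps.take k
    · rw [if_pos hmem]
      have hidx : ps.idxOf ps[k] < k := (pvMem_take_iff_idxOf ps ps[k] k hmemk).mp hmem
      have hcont : d.contains ps[k] = true := by
        rw [PySem.Dict.contains_eq_isSome_get?, hd ps[k], if_pos hmem]; rfl
      rw [PySem.Dict.setdefault_of_contains d _ hcont]
      simp only [Option.getD_some]
      by_cases htest : ps.idxOf ps[k] + 2 ≤ k
      · rw [if_pos (by omega)]
        exact iff_of_true rfl ⟨k, le_refl k, hk, htest⟩
      · rw [if_neg (by omega)]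
        rw [ih (k + 1) d (by omega) (fun p => by
          rw [hd p]
          refine if_congr ?_ rfl rfl
          rw [htake1]
          simp only [List.mem_append, List.mem_singleton]
          exact ⟨Or.inl, fun h => h.elim id (fun hp => hp ▸ hmem)⟩)]
        constructor
        · rintro ⟨j, hj, h1, h2⟩; exact ⟨j, by omega, h1, h2⟩
        · rintro ⟨j, hj, h1, h2⟩
          rcases Nat.eq_or_lt_of_le hj with rfl | hlt
          · exact absurd h2 htest
          · exact ⟨j, hlt, h1, h2⟩
    · rw [if_neg hmem]
      have hncont : d.contains ps[k] = false := by
        rw [PySem.Dict.contains_eq_isSome_get?, hd ps[k], if_neg hmem]; rfl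
      rw [PySem.Dict.setdefault_of_not_contains d _ hncont]
      simp only [Option.getD_none]
      rw [if_neg (by omega : ¬ (2 ≤ (k : Int) - (k : Int)))]
      have hidxk : ps.idxOf ps[k] = k := by
        have h1 := pvIdxOf_getElem_le ps k hk
        have h2 : ¬ ps.idxOf ps[k] < k :=
          fun h => hmem ((pvMem_take_iff_idxOf ps ps[k] k hmemk).mpr h)
        omega
      rw [ih (k + 1) (d.insert ps[k] (k : Int)) (by omega) (fun p => by
        rw [PySem.Dict.get?_insert d _ p _]
        by_cases hp : p = ps[k]
        · have hpin : p ∈ ps.take (k + 1) := by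
            rw [htake1]
            exact List.mem_append_right _ (by simp [hp])
          rw [if_pos hp, if_pos hpin, hp, hidxk]
        · rw [if_neg hp, hd p]
          refine if_congr ?_ rfl rfl
          rw [htake1]
          simp only [List.mem_append, List.mem_singleton]
          exact ⟨Or.inl, fun h => h.elim id (fun h' => absurd h' hp)⟩)]
      constructor
      · rintro ⟨j, hj, h1, h2⟩; exact ⟨j, by omega, h1, h2⟩
      · rintro ⟨j, hj, h1, h2⟩
        rcases Nat.eq_or_lt_of_le hj with rfl | hlt
        · rw [hidxk] at h2; omega
        · exact ⟨j, hlt, h1, h2⟩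

-- the bridge: a pair repeated with gap ≥ 2 iff some pair sits ≥ 2 after its first occurrence
lemma pvBridge (ps : List (Char × Char)) :
    (∃ i, ∃ _ : i < ps.length, ps[i] ∈ ps.drop (i + 2)) ↔
    (∃ j, ∃ _ : j < ps.length, ps.idxOf ps[j] + 2 ≤ j) := by
  constructor
  · rintro ⟨i, hi, hmem⟩
    obtain ⟨m, hm, hEq⟩ := List.mem_iff_getElem.mp hmem
    have hm' : m < ps.length - (i + 2) := by simpa using hm
    have hj : i + 2 + m < ps.length := by omega
    refine ⟨i + 2 + m, hj, ?_⟩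
    have hEq' : ps[i + 2 + m]'hj = ps[i]'hi := by
      rw [List.getElem_drop] at hEq; exact hEq
    rw [hEq']
    exact le_trans (Nat.add_le_add_right (pvIdxOf_getElem_le ps i hi) 2)
      (Nat.le_add_right (i + 2) m)
  · rintro ⟨j, hj, hle⟩
    have hmemj : ps[j] ∈ ps := List.getElem_mem hj
    have hidx : ps.idxOf ps[j] < ps.length := by omega
    refine ⟨ps.idxOf ps[j], hidx, ?_⟩
    rw [List.getElem_idxOf hidx]
    refine List.mem_iff_getElem.mpr ⟨j - (ps.idxOf ps[j] + 2), by simp; omega, ?_⟩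
    rw [List.getElem_drop]
    congr 1
    omega

-- ===== VERDICT (by name: the statement is the Claim_ definition above) =====
theorem contains_pair_no_overlapping_py_spec : Claim_equal_contains_pair_no_overlapping_py := by
  intro input _
  unfold Spec_contains_pair_no_overlapping_py contains_pair_no_overlapping_py contains_pair_no_overlapping_py_alt
  set cs := input.toList with hcs
  rw [PySem.List.slice_from_one]
  have hA := pvA_range' cs cs.length 0 (by omega)
  rw [← List.range_eq_range'] at hA
  have hB := pvB_loop (pvPairs cs) (pvPairs cs).length 0 PySem.Dict.empty (by omega)
    (by intro p; simp [PySem.Dict.get?_empty])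
  simp only [List.drop_zero, Nat.cast_zero] at hB
  have hlen := pvPairs_length cs
  rw [Bool.eq_iff_iff, hA]
  rw [show cs.zip cs.tail = pvPairs cs from rfl, hB]
  simp only [Nat.zero_le, true_and]
  rw [← pvBridge]
  constructor
  · rintro ⟨i, hi, hinf⟩
    refine ⟨i, by omega, ?_⟩
    rw [pvPair_infix_iff, pvPairs_drop] at hinf
    rwa [pvPairs_getElem cs i (by omega)]
  · rintro ⟨i, hi, hmem⟩
    refine ⟨i, by omega, ?_⟩
    rw [pvPair_infix_iff, pvPairs_drop]
    rwa [pvPairs_getElem cs i hi] at hmem
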